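-- pv_equiv track=rewrite | github.com/alexein777/astro_qf | quantum_fourier.py | __qlen
-- ===== SOURCE A (Python) =====
-- def __qlen(list_len):
--     n = 0
--     deg2 = True
--
--     while list_len != 0:
--         if list_len != 1 and list_len % 2 != 0:
--             deg2 = False
--
--         list_len //= 2
--         n += 1
--
--     if not deg2:
--         return n, 2 ** n
--     else:
--         return n - 1, 2 ** (n - 1)
-- ===== SOURCE B (Python) =====
-- def __qlen(list_len):
--     n = list_len.bit_length()
--     if list_len & (list_len - 1) == 0:
--         return n - 1, 2 ** (n - 1)
--     else:
--         return n, 2 ** n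
-- ===== Notes on version B (the rewrite author's own statement) =====
-- stated objective: faster
-- what changed: Replaced A's halving while-loop with constant-time bit operations: n = list_len.bit_length() and the power-of-two test list_len & (list_len - 1) == 0, keeping A's final branch.
-- outside the precondition, e.g. on __qlen(0): A returns (-1, 0.5), B returns (-1, 0.5)
import Mathlib
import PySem

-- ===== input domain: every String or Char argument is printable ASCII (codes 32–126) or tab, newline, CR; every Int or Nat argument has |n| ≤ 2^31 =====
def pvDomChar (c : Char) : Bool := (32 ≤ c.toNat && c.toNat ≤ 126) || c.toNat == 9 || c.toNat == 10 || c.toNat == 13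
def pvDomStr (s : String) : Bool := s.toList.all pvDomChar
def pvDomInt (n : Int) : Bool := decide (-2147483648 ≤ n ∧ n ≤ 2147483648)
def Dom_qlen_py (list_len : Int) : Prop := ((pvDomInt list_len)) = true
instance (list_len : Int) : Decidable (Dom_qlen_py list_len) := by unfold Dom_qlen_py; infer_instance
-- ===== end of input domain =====

-- B replaces A's halving while-loop by bit_length and the n & (n-1) power-of-two test (objective: faster, constant-factor).

-- ===== PORT A =====
-- the while-loop of A, with fuel making the recursion total; on Pre_ (list_len ≥ 1)
-- the fuel list_len.toNat is never exhausted, so this is exact there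
def qlenLoop : Nat → Int → Int → Bool → Int × Bool
  | 0, _, n, deg2 => (n, deg2)
  | fuel + 1, l, n, deg2 =>
    if l = 0 then (n, deg2)
    else qlenLoop fuel (PySem.Int.floordiv l 2) (n + 1)
      (if l ≠ 1 ∧ PySem.Int.mod l 2 ≠ 0 then false else deg2)

def qlen_py (list_len : Int) : Int × Int :=
  let r := qlenLoop list_len.toNat list_len 0 true
  -- Python's 2 ** n with n ≥ 0 (guaranteed on Pre_); ported as Int power on n.toNat
  if ¬ r.2 then (r.1, 2 ^ r.1.toNat) else (r.1 - 1, 2 ^ (r.1 - 1).toNat)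

-- ===== PORT B =====
def qlen_py_alt (list_len : Int) : Int × Int :=
  let n : Int := PySem.Int.bitLength list_len      -- list_len.bit_length()
  if PySem.Int.band list_len (list_len - 1) = 0    -- list_len & (list_len - 1) == 0
  then (n - 1, 2 ^ (n - 1).toNat)                  -- 2 ** (n-1), exact since n ≥ 1 on Pre_
  else (n, 2 ^ n.toNat)

-- ===== PRECONDITION & SPEC =====
-- Pre_ excludes list_len ≤ 0: A loops forever on negative input, and on 0 both A and B
-- return (-1, 0.5), a float not representable in the declared Int × Int return type.
def Pre_qlen_py (list_len : Int) : Prop := 1 ≤ list_len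
instance (list_len : Int) : Decidable (Pre_qlen_py list_len) := by unfold Pre_qlen_py; infer_instance
def pvWitness_qlen_py : Int := (6)
def Spec_qlen_py (list_len : Int) (out : Int × Int) : Prop := out = qlen_py_alt list_len
instance (list_len : Int) (out : Int × Int) : Decidable (Spec_qlen_py list_len out) := by unfold Spec_qlen_py; infer_instance

-- ===== CLAIM (what is proved, stated in full; the proofs are below) =====
def Claim_equal_qlen_py : Prop := ∀ (list_len : Int), Dom_qlen_py list_len → Pre_qlen_py list_len → Spec_qlen_py list_len (qlen_py list_len)

-- ===== LEMMAS AND PROOFS =====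

-- 2k &&& (2k-1) = 2 * (k &&& (k-1)) for k ≥ 1, via Nat.land_bit
theorem qlen_land_even (k : Nat) (h : 1 ≤ k) :
    (2 * k) &&& (2 * k - 1) = 2 * (k &&& (k - 1)) := by
  have h1 : 2 * k - 1 = Nat.bit true (k - 1) := by
    simp [Nat.bit]; omega
  have h2 : 2 * k = Nat.bit false k := by simp [Nat.bit]
  rw [h1, h2, Nat.land_bit]
  simp [Nat.bit]

theorem qlen_land_odd (k : Nat) : (2 * k + 1) &&& (2 * k) = 2 * k := by
  have h1 : 2 * k + 1 = Nat.bit true k := by simp [Nat.bit]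
  have h2 : 2 * k = Nat.bit false k := by simp [Nat.bit]
  rw [h1, h2, Nat.land_bit]
  have hk : k &&& k = k := by
    apply Nat.eq_of_testBit_eq; intro i; simp
  simp [Nat.bit, hk]

theorem qlenLoop_zero (fuel : Nat) (n : Int) (deg2 : Bool) :
    qlenLoop fuel 0 n deg2 = (n, deg2) := by
  cases fuel <;> simp [qlenLoop]

-- the loop invariant: on a positive argument the loop returns
-- (n + bit_length, deg2 && power-of-two test)
theorem qlenLoop_eq (m : Nat) : ∀ fuel (n : Int) deg2, 1 ≤ m → m ≤ fuel →
    qlenLoop fuel (m : Int) n deg2 =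
      (n + (PySem.Int.bitLength (m : Int) : Int),
       deg2 && decide (PySem.Int.band (m : Int) ((m : Int) - 1) = 0)) := by
  induction m using Nat.strong_induction_on with
  | _ m ih =>
    intro fuel n deg2 h1 hf
    match fuel with
    | 0 => omega
    | fuel + 1 =>
      have hm0 : (m : Int) ≠ 0 := by exact_mod_cast Nat.one_le_iff_ne_zero.mp h1
      rw [qlenLoop]
      simp only [hm0, if_false]
      have hdiv : PySem.Int.floordiv (m : Int) 2 = ((m / 2 : Nat) : Int) := by
        exact_mod_cast PySem.Int.floordiv_natCast m 2
      have hmod : PySem.Int.mod (m : Int) 2 = ((m % 2 : Nat) : Int) := by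
        exact_mod_cast PySem.Int.mod_natCast m 2
      have hsub : (m : Int) - 1 = ((m - 1 : Nat) : Int) := by omega
      have hband : PySem.Int.band (m : Int) ((m : Int) - 1) = ((m &&& (m - 1) : Nat) : Int) := by
        rw [hsub]; exact PySem.Int.band_natCast m (m - 1)
      rcases Nat.lt_or_ge m 2 with hlt | hge
      · -- m = 1: one more iteration then l = 0
        interval_cases m
        rw [hdiv, hmod]
        norm_num
        rw [qlenLoop_zero]
        have hb1 : PySem.Int.bitLength 1 = 1 := by decide
        simp [hb1]
      · -- m ≥ 2: recurse on m / 2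
        have hrec := ih (m / 2) (by omega) fuel (n + 1)
          (if (m : Int) ≠ 1 ∧ PySem.Int.mod (m : Int) 2 ≠ 0 then false else deg2)
          (by omega) (by omega)
        rw [hdiv, hrec]
        have hbl : PySem.Int.bitLength (m : Int) =
            PySem.Int.bitLength ((m / 2 : Nat) : Int) + 1 :=
          PySem.Int.bitLength_natCast (by omega)
        have hsub2 : ((m / 2 : Nat) : Int) - 1 = ((m / 2 - 1 : Nat) : Int) := by omega
        have hband2 : PySem.Int.band ((m / 2 : Nat) : Int) (((m / 2 : Nat) : Int) - 1)
            = ((m / 2 &&& (m / 2 - 1) : Nat) : Int) := by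
          rw [hsub2]; exact PySem.Int.band_natCast (m / 2) (m / 2 - 1)
        rw [hbl, hband, hband2]
        rcases Nat.even_or_odd m with he | ho
        · -- even: deg2 unchanged, the land test reduces to the half
          obtain ⟨k, hk⟩ := he
          have hk2 : m = 2 * k := by omega
          have hz : PySem.Int.mod (m : Int) 2 = 0 := by rw [hmod]; omega
          simp only [hz, ne_eq, not_true_eq_false, and_false, if_false]
          have e1 : m / 2 = k := by omega
          have e2 : m - 1 = 2 * k - 1 := by omega
          have hland := qlen_land_even k (by omega)
          have hEq : m &&& (m - 1) = 2 * (m / 2 &&& (m / 2 - 1)) := by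
            rw [e2, e1, hk2]; exact hland
          simp only [Prod.mk.injEq]
          constructor
          · push_cast; ring
          · congr 1
            rw [decide_eq_decide, hEq]
            omega
        · -- odd ≥ 3: deg2 becomes false and the land test is nonzero
          obtain ⟨k, hk⟩ := ho
          have hk1 : 1 ≤ k := by omega
          have hmo : PySem.Int.mod (m : Int) 2 ≠ 0 := by rw [hmod]; omega
          have hm1 : (m : Int) ≠ 1 := by omega
          simp only [hm1, hmo, ne_eq, not_false_eq_true, and_self, if_true]
          have hland : m &&& (m - 1) = 2 * k := by
            have e2 : m - 1 = 2 * k := by omega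
            have hk' : m = 2 * k + 1 := by omega
            rw [e2, hk']; exact qlen_land_odd k
          simp only [Prod.mk.injEq, Bool.false_and]
          constructor
          · push_cast; ring
          · rw [hland]
            simp
            intro _
            omega

-- ===== VERDICT (by name: the statement is the Claim_ definition above) =====
theorem qlen_py_spec : Claim_equal_qlen_py := by
  intro l _ hpre
  unfold Spec_qlen_py qlen_py qlen_py_alt
  have hp : 1 ≤ l := hpre
  have hl : l = (l.toNat : Int) := by omega
  rw [hl]
  simp only [Int.toNat_natCast]
  rw [qlenLoop_eq l.toNat l.toNat 0 true (by omega) (le_refl _)]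
  simp only [Bool.true_and, zero_add]
  rcases Decidable.em (PySem.Int.band ((l.toNat : Int)) ((l.toNat : Int) - 1) = 0) with h | h
  · simp [h]
  · simp [h]
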